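-- pv_equiv track=rewrite | github.com/koba925/alds | atcoder/ABC152/C.py | low_elements
-- ===== SOURCE A (Python) =====
-- def low_elements(N, P):
--     min_elem = N + 1
--     ret = 0
--     for p in P:
--         if p <= min_elem:
--             ret += 1
--             min_elem = p
--     return ret
-- ===== SOURCE B (Python) =====
-- def low_elements(N, P):
--     # Build the table of pre-inclusion prefix minima (seeded with N+1), then count.
--     prefs = []
--     m = N + 1
--     for p in P:
--         prefs.append(m)
--         m = min(m, p)
--     return sum(1 for p, q in zip(P, prefs) if p <= q)
-- ===== Notes on version B (the rewrite author's own statement) =====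
-- stated objective: alternative
-- what changed: B splits the single stateful loop into two passes: it first materialises the table of pre-inclusion prefix minima seeded with N+1, then counts positions where the element is at most its preceding prefix minimum, instead of maintaining the running minimum and counter inline.
import Mathlib
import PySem

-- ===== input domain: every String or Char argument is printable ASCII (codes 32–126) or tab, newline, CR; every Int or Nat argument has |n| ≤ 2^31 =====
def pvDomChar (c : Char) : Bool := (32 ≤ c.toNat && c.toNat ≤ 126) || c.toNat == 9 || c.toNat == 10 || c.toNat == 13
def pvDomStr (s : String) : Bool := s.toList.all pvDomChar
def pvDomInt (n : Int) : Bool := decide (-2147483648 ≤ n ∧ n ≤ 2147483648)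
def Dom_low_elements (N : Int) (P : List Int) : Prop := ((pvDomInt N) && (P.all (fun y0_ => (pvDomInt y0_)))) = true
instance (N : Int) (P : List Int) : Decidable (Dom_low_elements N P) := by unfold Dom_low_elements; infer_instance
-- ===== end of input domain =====

-- B builds the table of pre-inclusion prefix minima first, then counts in a second pass (alternative decomposition, same cost).


-- ===== PORT A =====
-- literal port of A: one fold maintaining (min_elem, ret)
def low_elements (N : Int) (P : List Int) : Int :=
  (P.foldl (fun (s : Int × Int) p => if p ≤ s.1 then (p, s.2 + 1) else s) (N + 1, 0)).2

-- ===== PORT B =====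
-- the list of pre-inclusion prefix minima seeded with m (one per element of P)
def lowPrefs (m : Int) : List Int → List Int
  | [] => []
  | p :: ps => m :: lowPrefs (min m p) ps

def low_elements_alt (N : Int) (P : List Int) : Int :=
  (((P.zip (lowPrefs (N + 1) P)).filter (fun pq => pq.1 ≤ pq.2)).length : Int)

-- ===== PRECONDITION & SPEC =====
def Spec_low_elements (N : Int) (P : List Int) (out : Int) : Prop := out = low_elements_alt N P
instance (N : Int) (P : List Int) (out : Int) : Decidable (Spec_low_elements N P out) := by unfold Spec_low_elements; infer_instance

-- ===== CLAIM (what is proved, stated in full; the proofs are below) =====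
def Claim_equal_low_elements : Prop := ∀ (N : Int) (P : List Int), Dom_low_elements N P → Spec_low_elements N P (low_elements N P)

-- ===== LEMMAS AND PROOFS =====
theorem low_elements_key (P : List Int) : ∀ (m r : Int),
    (P.foldl (fun (s : Int × Int) p => if p ≤ s.1 then (p, s.2 + 1) else s) (m, r)).2
      = r + (((P.zip (lowPrefs m P)).filter (fun pq => pq.1 ≤ pq.2)).length : Int) := by
  induction P with
  | nil => intro m r; simp [lowPrefs]
  | cons p ps ih =>
    intro m r
    by_cases h : p ≤ m
    · have hmin : min m p = p := min_eq_right h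
      simp [lowPrefs, List.foldl, h, ih p (r + 1)]
      push_cast
      ring
    · have hmin : min m p = m := min_eq_left (le_of_not_ge h)
      simp [lowPrefs, List.foldl, h, hmin, ih m r]

-- ===== VERDICT (by name: the statement is the Claim_ definition above) =====
theorem low_elements_spec : Claim_equal_low_elements := by
  intro N P _
  show _ = _
  rw [low_elements, low_elements_alt, low_elements_key]
  ring
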